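-- pv_equiv track=rewrite | github.com/Matiash-d-s/coelus_final_test | main.py | recoord
-- ===== SOURCE A (Python) =====
-- def recoord(cd, index):
--     if cd[index][2] != 3:
--         cd[index][2] += 1
--         return cd
--     else:
--         cd[index][2] = 0
--         index -= 1
--         if index > -1:
--             return recoord(cd, index)
--         else:
--             cd[index+1][2] = 4
--             return cd
-- ===== SOURCE B (Python) =====
-- def recoord(cd, index):
--     # find the stopping position: scan down past the chain of 3s
--     stop = index
--     while stop > 0 and cd[stop][2] == 3:
--         stop -= 1
--     # zero out the whole chain above the stopping position in one pass
--     for j in range(stop + 1, index + 1):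
--         cd[j][2] = 0
--     if cd[stop][2] != 3:
--         cd[stop][2] += 1
--     else:
--         cd[stop][2] = 4
--     return cd
-- ===== Notes on version B (the rewrite author's own statement) =====
-- stated objective: alternative
-- what changed: B replaces A's one-row-at-a-time tail recursion (test, mutate, recurse) by a two-phase scan: first locate the stopping position past the chain of 3s, then zero the whole chain in one bulk pass and finish with a single write (increment, or the 4 sentinel).
import Mathlib
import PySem

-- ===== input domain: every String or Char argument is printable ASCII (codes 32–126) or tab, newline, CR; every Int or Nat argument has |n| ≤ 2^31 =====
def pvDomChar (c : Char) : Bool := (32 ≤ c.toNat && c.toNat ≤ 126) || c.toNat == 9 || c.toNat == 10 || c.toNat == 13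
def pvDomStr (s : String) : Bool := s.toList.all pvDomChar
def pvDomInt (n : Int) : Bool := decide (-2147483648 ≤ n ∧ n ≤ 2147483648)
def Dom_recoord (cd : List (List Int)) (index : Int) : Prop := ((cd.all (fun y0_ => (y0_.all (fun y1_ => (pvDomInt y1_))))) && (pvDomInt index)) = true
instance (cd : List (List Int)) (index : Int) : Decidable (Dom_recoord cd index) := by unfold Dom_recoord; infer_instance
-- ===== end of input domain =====

-- B replaces A's per-row tail recursion by a find-the-stop scan followed by one bulk zeroing pass and a single final write;
-- both mutate `cd` in place in Python (same writes), the equivalence proved here is about the returned list.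


-- ===== PORT A =====
-- cd[i][2] as Python reads it (negative i wraps; none = IndexError)
def rd2 (cd : List (List Int)) (i : Int) : Option Int :=
  (PySem.List.pyGet? cd i).bind (fun row => PySem.List.pyGet? row 2)

-- the write cd[i][2] = v; exact whenever the corresponding Python write succeeds (both indexes in range)
def wr2 (cd : List (List Int)) (i : Int) (v : Int) : List (List Int) :=
  let n : Int := if i < 0 then i + cd.length else i
  cd.modify n.toNat (fun row => row.set 2 v)

def recoord (cd : List (List Int)) (index : Int) : List (List Int) :=
  match rd2 cd index with
  | none => cd                                   -- Python raises here (outside Pre_)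
  | some v =>
    if v ≠ 3 then wr2 cd index (v + 1)
    else
      let cd' := wr2 cd index 0
      let index' := index - 1
      if h : index' > -1 then recoord cd' index'
      else wr2 cd' (index' + 1) 4
termination_by index.toNat
decreasing_by omega

-- ===== PORT B =====
-- while stop > 0 and cd[stop][2] == 3: stop -= 1
def findStop (cd : List (List Int)) (stop : Int) : Int :=
  if h : stop > 0 ∧ rd2 cd stop = some 3 then findStop cd (stop - 1) else stop
termination_by stop.toNat
decreasing_by omega

def recoord_alt (cd : List (List Int)) (index : Int) : List (List Int) :=
  let stop := findStop cd index
  let cd1 := (PySem.List.pyRange (stop + 1) (index + 1) 1).foldl (fun acc j => wr2 acc j 0) cd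
  match rd2 cd1 stop with
  | none => cd1                                  -- Python raises here (outside Pre_)
  | some v => if v ≠ 3 then wr2 cd1 stop (v + 1) else wr2 cd1 stop 4

-- ===== PRECONDITION & SPEC =====
-- Pre_ = exactly the inputs where Python A returns (no IndexError): a valid start row, and every row
-- the downward carry chain of 3s actually visits has at least 3 entries.  (e2 cd j = element cd[j][2].)
def e2 (cd : List (List Int)) (j : Nat) : Option Int := cd[j]?.bind (fun r => r[2]?)

def Pre_recoord (cd : List (List Int)) (index : Int) : Prop :=
  if 0 ≤ index then
    index < (cd.length : Int) ∧
    ∀ i : Nat, i ≤ index.toNat →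
      (∀ j : Nat, j ≤ index.toNat → i < j → e2 cd j = some 3) →
      3 ≤ (cd.getD i []).length
  else
    0 ≤ index + cd.length ∧ 3 ≤ (cd.getD (index + cd.length).toNat []).length
instance (cd : List (List Int)) (index : Int) : Decidable (Pre_recoord cd index) := by
  unfold Pre_recoord; infer_instance

def pvWitness_recoord : List (List Int) × Int := ([[0, 0, 3], [1, 1, 3], [2, 2, 1]], 2)

def Spec_recoord (cd : List (List Int)) (index : Int) (out : List (List Int)) : Prop := out = recoord_alt cd index
instance (cd : List (List Int)) (index : Int) (out : List (List Int)) : Decidable (Spec_recoord cd index out) := by unfold Spec_recoord; infer_instance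

-- ===== CLAIM (what is proved, stated in full; the proofs are below) =====
def Claim_equal_recoord : Prop := ∀ (cd : List (List Int)) (index : Int), Dom_recoord cd index → Pre_recoord cd index → Spec_recoord cd index (recoord cd index)

-- ===== LEMMAS AND PROOFS =====

-- reading below a non-negative write position is unaffected
theorem rd2_wr2_ne (cd : List (List Int)) (i j v : Int) (hi : 0 ≤ i) (hj : 0 ≤ j)
    (hne : j ≠ i) : rd2 (wr2 cd i v) j = rd2 cd j := by
  have h1 : ¬ i < 0 := by omega
  simp only [rd2, wr2, h1, if_false]
  rw [PySem.List.pyGet?_of_nonneg _ hj, PySem.List.pyGet?_of_nonneg _ hj,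
    List.getElem?_modify_ne _ _ (by omega)]

-- two writes at the same position collapse
theorem wr2_wr2_same (cd : List (List Int)) (i v w : Int) :
    wr2 (wr2 cd i v) i w = wr2 cd i w := by
  simp only [wr2, List.length_modify]
  rw [List.modify_modify_eq]
  congr 1
  funext row
  simp [Function.comp, List.set_set]

-- non-negative writes at distinct positions commute
theorem wr2_comm (cd : List (List Int)) (i j v w : Int) (hi : 0 ≤ i) (hj : 0 ≤ j)
    (hne : i ≠ j) : wr2 (wr2 cd i v) j w = wr2 (wr2 cd j w) i v := by
  simp only [wr2, List.length_modify]
  have h1 : ¬ i < 0 := by omega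
  have h2 : ¬ j < 0 := by omega
  simp only [h1, h2, if_false]
  rw [List.modify_modify_ne]
  omega

theorem findStop_le (cd : List (List Int)) (s : Int) :
    findStop cd s ≤ s ∧ (0 ≤ s → 0 ≤ findStop cd s) := by
  rw [findStop]
  split
  · rename_i h
    have := findStop_le cd (s - 1)
    constructor
    · omega
    · intro _; exact this.2 (by omega)
  · exact ⟨le_refl s, fun h => h⟩
termination_by s.toNat
decreasing_by omega

-- a write strictly above the scanned region does not change the stop
theorem findStop_wr2 (cd : List (List Int)) (i v s : Int) (hs : s < i) (hi : 0 ≤ i) :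
    findStop (wr2 cd i v) s = findStop cd s := by
  rw [findStop]
  conv_rhs => rw [findStop]
  by_cases h0 : s > 0
  · rw [rd2_wr2_ne cd i s v hi (by omega) (by omega)]
    by_cases hc : s > 0 ∧ rd2 cd s = some 3
    · rw [dif_pos hc, dif_pos hc]
      exact findStop_wr2 cd i v (s - 1) (by omega) hi
    · rw [dif_neg hc, dif_neg hc]
  · have hc : ¬ (s > 0 ∧ rd2 (wr2 cd i v) s = some 3) := fun h => h0 h.1
    have hc' : ¬ (s > 0 ∧ rd2 cd s = some 3) := fun h => h0 h.1
    rw [dif_neg hc, dif_neg hc']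
termination_by s.toNat
decreasing_by omega

-- pulling a write at a position above every element of the list out of the zeroing fold
theorem foldl_wr2_comm (l : List Int) (cd : List (List Int)) (i v : Int) (hi : 0 ≤ i)
    (hl : ∀ j ∈ l, 0 ≤ j ∧ j < i) :
    l.foldl (fun acc j => wr2 acc j 0) (wr2 cd i v) =
      wr2 (l.foldl (fun acc j => wr2 acc j 0) cd) i v := by
  induction l generalizing cd with
  | nil => rfl
  | cons a t ih =>
    have ha := hl a (by simp)
    simp only [List.foldl_cons]
    rw [wr2_comm cd i a v 0 hi ha.1 (by omega)]
    exact ih (wr2 cd a 0) (fun j hj => hl j (by simp [hj]))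

theorem recoord_eq_alt (cd : List (List Int)) (index : Int) :
    recoord cd index = recoord_alt cd index := by
  rw [recoord]
  cases hr : rd2 cd index with
  | none =>
    -- Python A raises; both ports return cd
    have hstop : findStop cd index = index := by
      rw [findStop]; split
      · rename_i h; rw [hr] at h; exact absurd h.2 (by simp)
      · rfl
    simp only [recoord_alt, hstop, PySem.List.pyRange_one_eq_nil (by omega : index + 1 ≤ index + 1),
      List.foldl_nil, hr]
  | some v =>
    by_cases hv : v ≠ 3
    · -- no carry: increment in place
      have hstop : findStop cd index = index := by
        rw [findStop]; split
        · rename_i h; rw [hr] at h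
          exact absurd (Option.some.inj h.2) hv
        · rfl
      simp only [recoord_alt, hstop,
        PySem.List.pyRange_one_eq_nil (by omega : index + 1 ≤ index + 1),
        List.foldl_nil, hr, if_pos hv]
    · simp only [ne_eq, not_not] at hv
      subst hv
      simp only [ne_eq, not_true_eq_false, if_false]
      by_cases hpos : index - 1 > -1
      · -- carry: A recurses; B scans past this row
        rw [dif_pos hpos]
        have hIH := recoord_eq_alt (wr2 cd index 0) (index - 1)
        rw [hIH]
        -- now show recoord_alt (wr2 cd index 0) (index-1) = recoord_alt cd index
        have hi0 : (0:Int) ≤ index := by omega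
        have hstop1 : findStop (wr2 cd index 0) (index - 1) = findStop cd (index - 1) :=
          findStop_wr2 cd index 0 (index - 1) (by omega) hi0
        have hstop2 : findStop cd index = findStop cd (index - 1) := by
          rw [findStop]; rw [dif_pos ⟨by omega, hr⟩]
        have hb1 := findStop_le cd (index - 1)
        set st := findStop cd (index - 1) with hst
        have hstle : st ≤ index - 1 := hb1.1
        have hstnn : 0 ≤ st := hb1.2 (by omega)
        simp only [recoord_alt, hstop1, hstop2]
        -- the two zeroed lists coincide
        have hsplit : PySem.List.pyRange (st + 1) (index + 1) 1 =
            PySem.List.pyRange (st + 1) index 1 ++ [index] := by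
          have := PySem.List.pyRange_one_succ_right (a := st + 1) (b := index) (by omega)
          simpa using this
        have hcd1 : (PySem.List.pyRange (st + 1) (index + 1) 1).foldl (fun acc j => wr2 acc j 0) cd =
            (PySem.List.pyRange (st + 1) index 1).foldl (fun acc j => wr2 acc j 0) (wr2 cd index 0) := by
          rw [hsplit, List.foldl_append]
          simp only [List.foldl_cons, List.foldl_nil]
          rw [foldl_wr2_comm _ cd index 0 hi0]
          intro j hj
          rw [PySem.List.mem_pyRange_one] at hj
          omega
        rw [hcd1]
        have hidx : index - 1 + 1 = index := by omega
        rw [hidx]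
      · -- chain hit the bottom (or a negative start): final write is the 4 sentinel
        rw [dif_neg hpos]
        have hstop : findStop cd index = index := by
          rw [findStop]; split
          · rename_i h; omega
          · rfl
        simp only [recoord_alt, hstop,
          PySem.List.pyRange_one_eq_nil (by omega : index + 1 ≤ index + 1), List.foldl_nil, hr]
        simp only [ne_eq, not_true_eq_false, if_false]
        have : index - 1 + 1 = index := by omega
        rw [this, wr2_wr2_same]
termination_by index.toNat
decreasing_by omega

-- ===== VERDICT (by name: the statement is the Claim_ definition above) =====
theorem recoord_spec : Claim_equal_recoord := by
  intro cd index _ _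
  unfold Spec_recoord
  exact recoord_eq_alt cd index
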